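-- pv_equiv track=rewrite | github.com/sandhaka/learning-path | dynamic_programming/construct/all_construct.py | all_constructs
-- ===== SOURCE A (Python) =====
-- def all_constructs(target, word_bank, memo=None):
--     if len(target) == 0:
--         return [[]]  # Solution reached
--     if memo is None:
--         memo = {}
--     elif target in memo.keys():
--         return memo[target]
--     allconstruncts = []
--     for w in word_bank:
--         if target.startswith(w):
--             new_target = target.removeprefix(w)
--             construncts = all_constructs(new_target, word_bank, memo)
--             # Alternative with list - map:
--             # allconstruncts.extend(list(map(lambda c: [w] + c, construncts)))
--             for construnct in construncts:
--                 construnct = [w] + construnct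
--                 allconstruncts.append(construnct)
--     memo[target] = allconstruncts
--     return allconstruncts
-- ===== SOURCE B (Python) =====
-- def all_constructs(target, word_bank, memo=None):
--     # Bottom-up DP over suffix start positions instead of memoized recursion.
--     # Note: A mutates the caller-supplied memo dict; B only reads it (return value is the same).
--     n = len(target)
--     if n == 0:
--         return [[]]
--     if memo is None:
--         memo = {}
--     elif target in memo:
--         return memo[target]
--     table = [None] * (n + 1)
--     table[n] = [[]]
--     for i in range(n - 1, -1, -1):
--         suffix = target[i:]
--         if suffix in memo:
--             table[i] = memo[suffix]
--         else:
--             ways = []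
--             for w in word_bank:
--                 if w and target.startswith(w, i):
--                     ways.extend([w] + c for c in table[i + len(w)])
--             table[i] = ways
--     return table[0]
-- ===== Notes on version B (the rewrite author's own statement) =====
-- stated objective: alternative
-- what changed: Replaces A's memoized top-down recursion by a bottom-up DP that fills a table of construction lists over suffix start positions (consulting the caller-supplied memo per suffix and skipping empty words); A additionally mutates the caller's memo dict while B only reads it, so the equivalence is about the return value. Pre_ excludes only the inputs where A dies with RecursionError (nonempty target, empty string in word_bank, no memo hit for the whole target); B returns the constructions from the remaining words there.
import Mathlib
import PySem

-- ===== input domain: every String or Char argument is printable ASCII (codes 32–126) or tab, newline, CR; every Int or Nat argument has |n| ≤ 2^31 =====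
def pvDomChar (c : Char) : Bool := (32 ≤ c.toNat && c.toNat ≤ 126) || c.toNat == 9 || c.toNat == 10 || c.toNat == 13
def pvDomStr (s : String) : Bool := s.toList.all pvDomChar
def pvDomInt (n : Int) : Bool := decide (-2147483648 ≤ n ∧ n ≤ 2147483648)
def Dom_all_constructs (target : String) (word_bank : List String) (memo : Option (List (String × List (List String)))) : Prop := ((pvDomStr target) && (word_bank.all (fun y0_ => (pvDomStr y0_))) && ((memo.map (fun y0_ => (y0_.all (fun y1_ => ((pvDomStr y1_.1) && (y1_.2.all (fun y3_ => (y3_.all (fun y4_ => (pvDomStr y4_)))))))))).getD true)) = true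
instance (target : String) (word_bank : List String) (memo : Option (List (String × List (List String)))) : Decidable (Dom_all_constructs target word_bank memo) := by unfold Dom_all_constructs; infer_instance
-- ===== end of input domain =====

-- B replaces A's memoized top-down recursion by a bottom-up DP table over suffix start
-- positions (objective: alternative decomposition, same asymptotic cost).
-- Side effects: Python A mutates the caller-supplied memo dict, Python B only reads it;
-- the equivalence proved here is about the RETURN value.

-- ===== PORT A =====
-- A's recursion, with the memo dict threaded through (in recursive calls memo is always a
-- dict).  fuel makes the recursion total: under Pre_ (no empty word reaches the loop, or the
-- memo hits) every recursive call strictly shortens the target, so fuel = len(target)+1 is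
-- never exhausted.
def goA (fuel : Nat) (target : String) (word_bank : List String)
    (memo : PySem.Dict String (List (List String))) :
    List (List String) × PySem.Dict String (List (List String)) :=
  match fuel with
  | 0 => ([], memo)          -- fuel exhausted (unreachable under Pre_)
  | fuel + 1 =>
    if target.toList.length = 0 then ([[]], memo)   -- len(target) == 0
    else
      match memo.get? target with                    -- target in memo.keys(): return memo[target]
      | some v => (v, memo)
      | none =>
        -- allconstruncts = []; for w in word_bank: …
        let st := word_bank.foldl
          (fun (st : List (List String) × PySem.Dict String (List (List String))) w =>
            if PySem.Str.startswith target w then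
              -- new_target = target.removeprefix(w): exact under the startswith guard
              let nt := String.ofList (target.toList.drop w.toList.length)
              let r := goA fuel nt word_bank st.2
              -- for construnct in construncts: allconstruncts.append([w] + construnct)
              (st.1 ++ r.1.map (fun c => w :: c), r.2)
            else st)
          ([], memo)
        (st.1, st.2.insert target st.1)              -- memo[target] = allconstruncts

def all_constructs (target : String) (word_bank : List String)
    (memo : Option (List (String × List (List String)))) : List (List String) :=
  -- memo=None becomes the fresh empty dict A creates; the body is goA (a None memo and an
  -- empty dict behave identically, since 'target in {}' is false).
  (goA (target.toList.length + 1) target word_bank (PySem.Dict.mk (memo.getD []))).1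

-- ===== PORT B =====
-- table[i] for one suffix start position i: memo hit, else
-- 'for w in word_bank: if w and target.startswith(w, i): ways.extend([w] + c for c in table[i+len(w)])'.
-- tbl lists table[i+1..n] front-first, so table[i+len(w)] is tbl[len(w)-1] (in range: the
-- startswith guard gives 1 ≤ len(w) ≤ len(suffix)).
def rowB (s : List Char) (word_bank : List String)
    (memo : PySem.Dict String (List (List String)))
    (tbl : List (List (List String))) : List (List String) :=
  match memo.get? (String.ofList s) with
  | some v => v
  | none =>
    word_bank.foldl
      (fun ways w =>
        if w.toList ≠ [] ∧ PySem.Chars.startswith s w.toList = true then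
          ways ++ (tbl.getD (w.toList.length - 1) []).map (fun c => w :: c)
        else ways)
      []

-- the loop 'for i in range(n-1, -1, -1)': build the table back-to-front, one row per suffix
def goB (word_bank : List String) (memo : PySem.Dict String (List (List String))) :
    List Char → List (List (List String))
  | [] => [[[]]]                                    -- table[n] = [[]]
  | c :: rest =>
    let tbl := goB word_bank memo rest
    rowB (c :: rest) word_bank memo tbl :: tbl

def all_constructs_alt (target : String) (word_bank : List String)
    (memo : Option (List (String × List (List String)))) : List (List String) :=
  if target.toList.length = 0 then [[]]
  else
    let d := PySem.Dict.mk (memo.getD [])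
    match d.get? target with                         -- elif target in memo: return memo[target]
    | some v => v
    | none => (goB word_bank d target.toList).headD []   -- return table[0]

-- ===== PRECONDITION & SPEC =====
-- Pre_ excludes exactly the inputs on which Python A hits the infinite
-- 'target.removeprefix("") == target' recursion and dies with RecursionError: a nonempty
-- target with "" in word_bank and no memo hit for the whole target.
def Pre_all_constructs (target : String) (word_bank : List String) (memo : Option (List (String × List (List String)))) : Prop :=
  target = "" ∨ "" ∉ word_bank ∨ ((PySem.Dict.mk (memo.getD [])).get? target).isSome = true
instance (target : String) (word_bank : List String) (memo : Option (List (String × List (List String)))) : Decidable (Pre_all_constructs target word_bank memo) := by unfold Pre_all_constructs; infer_instance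

def pvWitness_all_constructs : String × List String × (Option (List (String × List (List String)))) :=
  ("abab", ["a", "b", "ab"], none)

def Spec_all_constructs (target : String) (word_bank : List String) (memo : Option (List (String × List (List String)))) (out : List (List String)) : Prop := out = all_constructs_alt target word_bank memo
instance (target : String) (word_bank : List String) (memo : Option (List (String × List (List String)))) (out : List (List String)) : Decidable (Spec_all_constructs target word_bank memo out) := by unfold Spec_all_constructs; infer_instance

-- ===== CLAIM (what is proved, stated in full; the proofs are below) =====
def Claim_equal_all_constructs : Prop := ∀ (target : String) (word_bank : List String) (memo : Option (List (String × List (List String)))), Dom_all_constructs target word_bank memo → Pre_all_constructs target word_bank memo → Spec_all_constructs target word_bank memo (all_constructs target word_bank memo)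

-- ===== LEMMAS AND PROOFS =====

-- the common DP value of a suffix s: the memo value if the initial memo has it, else the
-- word_bank fold over all matching nonempty words
def Vspec (word_bank : List String) (d : PySem.Dict String (List (List String))) :
    List Char → List (List String)
  | [] => [[]]
  | c :: rest =>
    match d.get? (String.ofList (c :: rest)) with
    | some v => v
    | none =>
      word_bank.flatMap (fun w =>
        if h : w.toList ≠ [] ∧ PySem.Chars.startswith (c :: rest) w.toList = true then
          (Vspec word_bank d ((c :: rest).drop w.toList.length)).map (fun cns => w :: cns)
        else [])
  termination_by s => s.length
  decreasing_by
    have hp : w.toList <+: (c :: rest) := (PySem.Chars.startswith_iff _ _).mp h.2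
    have h1 : 1 ≤ w.toList.length := by
      cases hw : w.toList with
      | nil => exact absurd hw h.1
      | cons a l => simp
    have h2 := hp.length_le
    simp only [List.length_drop, List.length_cons] at h2 ⊢
    omega

lemma tails_map_getD (V : List Char → List (List String)) (rest : List Char) (k : Nat)
    (hk : k ≤ rest.length) : (rest.tails.map V).getD k [] = V (rest.drop k) := by
  have h1 : (rest.tails)[k]? = some (rest.drop k) := by
    rw [List.getElem?_eq_getElem (by simp; omega)]
    simp [List.getElem_tails]
  simp [List.getD, h1]

lemma rowB_eq_Vspec (word_bank : List String) (d : PySem.Dict String (List (List String)))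
    (c : Char) (rest : List Char) :
    rowB (c :: rest) word_bank d (rest.tails.map (Vspec word_bank d)) =
      Vspec word_bank d (c :: rest) := by
  rw [rowB, Vspec]
  cases hm : d.get? (String.ofList (c :: rest)) with
  | some v => rfl
  | none =>
    have hstep : (fun (ways : List (List String)) (w : String) =>
        if w.toList ≠ [] ∧ PySem.Chars.startswith (c :: rest) w.toList = true then
          ways ++ (((rest.tails.map (Vspec word_bank d)).getD (w.toList.length - 1) []).map
            (fun cns => w :: cns))
        else ways) =
        (fun (ways : List (List String)) (w : String) => ways ++
          (if w.toList ≠ [] ∧ PySem.Chars.startswith (c :: rest) w.toList = true then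
            (Vspec word_bank d ((c :: rest).drop w.toList.length)).map (fun cns => w :: cns)
          else [])) := by
      funext ways w
      split_ifs with hP
      · have hp : w.toList <+: (c :: rest) := (PySem.Chars.startswith_iff _ _).mp hP.2
        have h1 : 1 ≤ w.toList.length := List.length_pos_of_ne_nil hP.1
        have h2 : w.toList.length ≤ rest.length + 1 := by
          have := hp.length_le; simpa using this
        rw [tails_map_getD _ _ _ (by omega)]
        have : (c :: rest).drop w.toList.length = rest.drop (w.toList.length - 1) := by
          cases hw : w.toList with
          | nil => exact absurd hw hP.1
          | cons a l => simp
        rw [this]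
      · simp
    rw [hstep, PySem.List.foldl_append_eq_flatMap]
    simp only [List.nil_append, dite_eq_ite]

lemma goB_eq_map_tails (word_bank : List String) (d : PySem.Dict String (List (List String)))
    (s : List Char) : goB word_bank d s = s.tails.map (Vspec word_bank d) := by
  induction s with
  | nil => simp [goB, Vspec]
  | cons c rest ih =>
    rw [goB]
    simp only [List.tails_cons, List.map_cons]
    rw [ih, rowB_eq_Vspec]

-- the `good` invariant: the threaded memo agrees with the initial dict except for computed
-- entries, which carry their Vspec value
def goodMemo (word_bank : List String) (d m : PySem.Dict String (List (List String))) : Prop :=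
  ∀ k : String, m.get? k = d.get? k ∨
    (d.get? k = none ∧ k.toList ≠ [] ∧ m.get? k = some (Vspec word_bank d k.toList))

-- one step of A's 'for w in word_bank' loop, as it appears after unfolding goA
lemma goA_fold (word_bank : List String) (d : PySem.Dict String (List (List String)))
    (fuel : Nat) (s : List Char)
    (IH : ∀ (s' : List Char) (m : PySem.Dict String (List (List String))),
      s'.length < fuel → goodMemo word_bank d m →
      (goA fuel (String.ofList s') word_bank m).1 = Vspec word_bank d s' ∧
      goodMemo word_bank d (goA fuel (String.ofList s') word_bank m).2)
    (hs : s.length ≤ fuel) :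
    ∀ (ws : List String), (∀ w ∈ ws, w ≠ "") →
    ∀ (acc : List (List String)) (m : PySem.Dict String (List (List String))),
      goodMemo word_bank d m →
      (ws.foldl (fun (st : List (List String) × PySem.Dict String (List (List String))) w =>
          if PySem.Str.startswith (String.ofList s) w = true then
            (st.1 ++ List.map (fun c => w :: c)
              (goA fuel (String.ofList (List.drop w.toList.length s)) word_bank st.2).1,
             (goA fuel (String.ofList (List.drop w.toList.length s)) word_bank st.2).2)
          else st) (acc, m)).1
        = acc ++ ws.flatMap (fun w =>
            if w.toList ≠ [] ∧ PySem.Chars.startswith s w.toList = true then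
              (Vspec word_bank d (s.drop w.toList.length)).map (fun cns => w :: cns)
            else []) ∧
      goodMemo word_bank d
        (ws.foldl (fun (st : List (List String) × PySem.Dict String (List (List String))) w =>
          if PySem.Str.startswith (String.ofList s) w = true then
            (st.1 ++ List.map (fun c => w :: c)
              (goA fuel (String.ofList (List.drop w.toList.length s)) word_bank st.2).1,
             (goA fuel (String.ofList (List.drop w.toList.length s)) word_bank st.2).2)
          else st) (acc, m)).2 := by
  intro ws
  induction ws with
  | nil => intro _ acc m hgood; simpa using hgood
  | cons w ws ih =>
    intro hws acc m hgood
    have hwne : w ≠ "" := hws w (by simp)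
    have hwlist : w.toList ≠ [] := fun h => hwne (String.toList_eq_nil_iff.mp h)
    simp only [List.foldl_cons, List.flatMap_cons]
    by_cases hsw : PySem.Str.startswith (String.ofList s) w = true
    · have hchars : PySem.Chars.startswith s w.toList = true := by
        simpa using hsw
      have hp : w.toList <+: s := (PySem.Chars.startswith_iff _ _).mp hchars
      have h1 : 1 ≤ w.toList.length := List.length_pos_of_ne_nil hwlist
      have h2 : w.toList.length ≤ s.length := hp.length_le
      have hlt : (s.drop w.toList.length).length < fuel := by
        simp only [List.length_drop]; omega
      obtain ⟨hr1, hr2⟩ := IH (s.drop w.toList.length) m hlt hgood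
      rw [if_pos hsw]
      obtain ⟨ht1, ht2⟩ := ih (fun x hx => hws x (by simp [hx])) _ _ hr2
      refine ⟨?_, ht2⟩
      rw [ht1, hr1, if_pos ⟨hwlist, hchars⟩]
      simp [List.append_assoc]
    · have hchars : ¬ (w.toList ≠ [] ∧ PySem.Chars.startswith s w.toList = true) := by
        intro hc
        exact hsw (by simpa using hc.2)
      rw [if_neg hsw, if_neg hchars]
      obtain ⟨ht1, ht2⟩ := ih (fun x hx => hws x (by simp [hx])) acc m hgood
      exact ⟨by rw [ht1]; simp, ht2⟩

lemma goA_spec (word_bank : List String) (d : PySem.Dict String (List (List String)))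
    (hbank : ∀ w ∈ word_bank, w ≠ "") :
    ∀ (fuel : Nat) (s : List Char) (m : PySem.Dict String (List (List String))),
      s.length < fuel → goodMemo word_bank d m →
      (goA fuel (String.ofList s) word_bank m).1 = Vspec word_bank d s ∧
      goodMemo word_bank d (goA fuel (String.ofList s) word_bank m).2 := by
  intro fuel
  induction fuel with
  | zero => intro s m h _; omega
  | succ fuel IH =>
    intro s m hlen hgood
    cases s with
    | nil =>
      rw [goA]
      refine ⟨?_, ?_⟩
      · simp [Vspec]
      · simpa using hgood
    | cons c rest =>
      rw [goA]
      simp only [String.toList_ofList, List.length_cons]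
      rw [if_neg (by omega)]
      cases hm : m.get? (String.ofList (c :: rest)) with
      | some v =>
        rcases hgood (String.ofList (c :: rest)) with hL | ⟨hd, _, hv⟩
        · rw [hm] at hL
          refine ⟨?_, hgood⟩
          rw [Vspec, ← hL]
        · rw [hv] at hm
          refine ⟨?_, hgood⟩
          simp only [String.toList_ofList] at hm
          exact (Option.some.injEq _ _ ▸ hm).symm
      | none =>
        have hd : d.get? (String.ofList (c :: rest)) = none := by
          rcases hgood (String.ofList (c :: rest)) with hL | ⟨hd', _, hv⟩
          · rw [hm] at hL; exact hL.symm
          · rw [hv] at hm; cases hm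
        have hfold := goA_fold word_bank d fuel (c :: rest) (fun s' m' h' g' => IH s' m' h' g')
          (by simpa using Nat.lt_succ_iff.mp hlen) word_bank hbank [] m hgood
        obtain ⟨h1, h2⟩ := hfold
        have hval : (word_bank.foldl (fun (st : List (List String) × PySem.Dict String (List (List String))) w =>
            if PySem.Str.startswith (String.ofList (c :: rest)) w = true then
              (st.1 ++ List.map (fun c => w :: c)
                (goA fuel (String.ofList (List.drop w.toList.length (c :: rest))) word_bank st.2).1,
               (goA fuel (String.ofList (List.drop w.toList.length (c :: rest))) word_bank st.2).2)
            else st) ([], m)).1 = Vspec word_bank d (c :: rest) := by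
          rw [h1, Vspec]
          simp only [hd, List.nil_append, dite_eq_ite]
        refine ⟨hval, ?_⟩
        intro k'
        by_cases hk : k' = String.ofList (c :: rest)
        · subst hk
          rw [PySem.Dict.get?_insert_self]
          right
          refine ⟨hd, by simp, ?_⟩
          rw [hval]
          simp
        · rw [PySem.Dict.get?_insert_of_ne _ _ hk]
          exact h2 k'

-- ===== VERDICT (by name: the statement is the Claim_ definition above) =====
theorem all_constructs_spec : Claim_equal_all_constructs := by
  intro target word_bank memo _ hpre
  unfold Spec_all_constructs all_constructs all_constructs_alt
  by_cases h0 : target.toList.length = 0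
  · have ht : target = "" := String.toList_eq_nil_iff.mp (List.length_eq_zero_iff.mp h0)
    subst ht
    rw [goA]
    simp
  · rw [if_neg h0]
    cases hd : (PySem.Dict.mk (memo.getD [])).get? target with
    | some v =>
      conv_lhs => rw [goA]
      rw [if_neg h0]
      simp only [hd]
    | none =>
      have hbank : ∀ w ∈ word_bank, w ≠ "" := by
        rcases hpre with h | h | h
        · exact absurd (by simp [h]) h0
        · intro w hw he; exact h (he ▸ hw)
        · rw [hd] at h; simp at h
      have hgood : goodMemo word_bank (PySem.Dict.mk (memo.getD []))
          (PySem.Dict.mk (memo.getD [])) := fun k => Or.inl rfl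
      obtain ⟨s, rfl⟩ : ∃ s, target = String.ofList s := ⟨target.toList, by simp⟩
      simp only [String.toList_ofList] at h0 hd ⊢
      have hA := (goA_spec word_bank (PySem.Dict.mk (memo.getD [])) hbank
        (s.length + 1) s (PySem.Dict.mk (memo.getD []))
        (by omega) hgood).1
      rw [hA, goB_eq_map_tails]
      simp only [hd]
      cases s with
      | nil => simp at h0
      | cons c rest => simp [Vspec, hd]
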